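-- pv_equiv track=rewrite | github.com/aditya25042005/ocr_extract | backend/ocr_backend/ml/aadhar_ocr.py | merge_boxes_into_lines
-- ===== SOURCE A (Python) =====
-- def merge_boxes_into_lines(boxes, y_threshold=12):
--     if not boxes: return []
--     boxes = sorted(boxes, key=lambda b: b[1])
--     lines = []
--     current_line = [boxes[0]]
--
--     for i in range(1, len(boxes)):
--         box = boxes[i]
--         last_box = current_line[-1]
--         cy_box = box[1] + (box[3] / 2)
--         cy_last = last_box[1] + (last_box[3] / 2)
--
--         if abs(cy_box - cy_last) < y_threshold:
--             current_line.append(box)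
--         else:
--             lines.append(current_line)
--             current_line = [box]
--     lines.append(current_line)
--
--     merged_results = []
--     for line_boxes in lines:
--         line_boxes = sorted(line_boxes, key=lambda b: b[0])
--         x_min = min(b[0] for b in line_boxes)
--         y_min = min(b[1] for b in line_boxes)
--         x_max = max(b[0] + b[2] for b in line_boxes)
--         y_max = max(b[1] + b[3] for b in line_boxes)
--         merged_results.append((int(x_min), int(y_min), int(x_max - x_min), int(y_max - y_min)))
--
--     return merged_results
-- ===== SOURCE B (Python) =====
-- def merge_boxes_into_lines(boxes, y_threshold=12):
--     out = []
--     it = iter(sorted(boxes, key=lambda b: b[1]))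
--     first = next(it, None)
--     if first is None:
--         return []
--     x, y, w, h = first
--     prev_cy = y + h / 2
--     x0, y0, x1, y1 = x, y, x + w, y + h
--     for (x, y, w, h) in it:
--         cy = y + h / 2
--         if abs(cy - prev_cy) < y_threshold:
--             x0 = min(x0, x); y0 = min(y0, y)
--             x1 = max(x1, x + w); y1 = max(y1, y + h)
--         else:
--             out.append((int(x0), int(y0), int(x1 - x0), int(y1 - y0)))
--             x0, y0, x1, y1 = x, y, x + w, y + h
--         prev_cy = cy
--     out.append((int(x0), int(y0), int(x1 - x0), int(y1 - y0)))
--     return out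
-- ===== Notes on version B (the rewrite author's own statement) =====
-- stated objective: simpler
-- what changed: B fuses grouping and aggregation into one pass over the y-sorted boxes, keeping only the previous center-y and running min/max bounds, instead of A's building per-line lists, re-sorting each line by x, and then scanning each line four times for min/max.
import Mathlib
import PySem

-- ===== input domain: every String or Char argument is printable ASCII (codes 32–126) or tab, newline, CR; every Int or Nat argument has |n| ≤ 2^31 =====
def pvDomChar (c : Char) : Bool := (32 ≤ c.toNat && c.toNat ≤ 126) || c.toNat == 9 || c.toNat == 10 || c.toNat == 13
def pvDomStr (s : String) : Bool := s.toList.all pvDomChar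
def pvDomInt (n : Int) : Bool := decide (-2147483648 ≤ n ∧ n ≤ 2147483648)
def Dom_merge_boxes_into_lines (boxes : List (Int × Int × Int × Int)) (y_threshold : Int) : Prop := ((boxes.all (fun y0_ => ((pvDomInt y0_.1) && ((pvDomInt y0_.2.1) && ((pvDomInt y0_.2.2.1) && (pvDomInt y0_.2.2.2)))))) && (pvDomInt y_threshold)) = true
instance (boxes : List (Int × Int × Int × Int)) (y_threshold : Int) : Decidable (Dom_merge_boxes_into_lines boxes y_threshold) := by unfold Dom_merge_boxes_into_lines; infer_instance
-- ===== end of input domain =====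

-- B fuses A's grouping pass, per-line x-sort and four min/max scans into one pass over the
-- y-sorted boxes keeping only running bounds (objective: simpler).  Return-value equivalence only.

-- ===== PORT A =====
-- Python compares |(y+h/2) - (y'+h'/2)| < t in exact dyadic floats (|values| ≤ 2^31);
-- multiplying by 2 gives the exact integer test |(2y+h) - (2y'+h')| < 2t used by both ports.
def pvCy2 (b : Int × Int × Int × Int) : Int := 2 * b.2.1 + b.2.2.2

-- the for-loop of A: remaining boxes, accumulated `lines`, the `current_line`
def pvLoopA (rest : List (Int × Int × Int × Int)) (lines : List (List (Int × Int × Int × Int)))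
    (cur : List (Int × Int × Int × Int)) (t : Int) : List (List (Int × Int × Int × Int)) :=
  match rest with
  | [] => lines ++ [cur]
  | b :: rs =>
    let last := cur.getLastD (0, 0, 0, 0)   -- current_line[-1]; cur is never empty
    if |pvCy2 b - pvCy2 last| < 2 * t then pvLoopA rs lines (cur ++ [b]) t
    else pvLoopA rs (lines ++ [cur]) [b] t

-- second loop body of A: sort the line by x, then min/max generators (int() on ints is identity)
def pvAggA (line : List (Int × Int × Int × Int)) : Int × Int × Int × Int :=
  let s := PySem.List.sorted line (fun b => b.1) false
  let x_min := (PySem.List.min? (s.map fun b => b.1) (fun v => v)).getD 0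
  let y_min := (PySem.List.min? (s.map fun b => b.2.1) (fun v => v)).getD 0
  let x_max := (PySem.List.max? (s.map fun b => b.1 + b.2.2.1) (fun v => v)).getD 0
  let y_max := (PySem.List.max? (s.map fun b => b.2.1 + b.2.2.2) (fun v => v)).getD 0
  (x_min, y_min, x_max - x_min, y_max - y_min)

def merge_boxes_into_lines (boxes : List (Int × Int × Int × Int)) (y_threshold : Int) :
    List (Int × Int × Int × Int) :=
  if boxes = [] then []
  else
    match PySem.List.sorted boxes (fun b => b.2.1) false with
    | [] => []   -- unreachable: sorted of a nonempty list is nonempty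
    | b0 :: rest => (pvLoopA rest [] [b0] y_threshold).map pvAggA

-- ===== PORT B =====
-- single fused pass: previous box `prev` and running bounds x0 y0 x1 y1 of the current line
def pvGoB (rest : List (Int × Int × Int × Int)) (prev : Int × Int × Int × Int)
    (x0 y0 x1 y1 : Int) (t : Int) : List (Int × Int × Int × Int) :=
  match rest with
  | [] => [(x0, y0, x1 - x0, y1 - y0)]
  | b :: rs =>
    if |pvCy2 b - pvCy2 prev| < 2 * t then
      pvGoB rs b (min x0 b.1) (min y0 b.2.1) (max x1 (b.1 + b.2.2.1)) (max y1 (b.2.1 + b.2.2.2)) t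
    else
      (x0, y0, x1 - x0, y1 - y0) ::
        pvGoB rs b b.1 b.2.1 (b.1 + b.2.2.1) (b.2.1 + b.2.2.2) t

def merge_boxes_into_lines_alt (boxes : List (Int × Int × Int × Int)) (y_threshold : Int) :
    List (Int × Int × Int × Int) :=
  match PySem.List.sorted boxes (fun b => b.2.1) false with
  | [] => []
  | b :: rs => pvGoB rs b b.1 b.2.1 (b.1 + b.2.2.1) (b.2.1 + b.2.2.2) y_threshold

-- ===== PRECONDITION & SPEC =====
def Spec_merge_boxes_into_lines (boxes : List (Int × Int × Int × Int)) (y_threshold : Int) (out : List (Int × Int × Int × Int)) : Prop := out = merge_boxes_into_lines_alt boxes y_threshold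
instance (boxes : List (Int × Int × Int × Int)) (y_threshold : Int) (out : List (Int × Int × Int × Int)) : Decidable (Spec_merge_boxes_into_lines boxes y_threshold out) := by unfold Spec_merge_boxes_into_lines; infer_instance

-- ===== CLAIM (what is proved, stated in full; the proofs are below) =====
def Claim_equal_merge_boxes_into_lines : Prop := ∀ (boxes : List (Int × Int × Int × Int)) (y_threshold : Int), Dom_merge_boxes_into_lines boxes y_threshold → Spec_merge_boxes_into_lines boxes y_threshold (merge_boxes_into_lines boxes y_threshold)

-- ===== LEMMAS AND PROOFS =====
-- running min/max of a nonempty list (0 on [] is never used)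
def pvMin1 : List Int → Int
  | [] => 0
  | x :: t => t.foldl min x

def pvMax1 : List Int → Int
  | [] => 0
  | x :: t => t.foldl max x

theorem pvMin1_perm (l l' : List Int) (h : l.Perm l') (hne : l' ≠ []) :
    (PySem.List.min? l (fun v => v)).getD 0 = pvMin1 l' := by
  match l, l' with
  | [], _ => exact absurd h.symm.eq_nil hne
  | x :: t, [] => exact absurd rfl hne
  | x :: t, x' :: t' =>
    rw [PySem.List.min?_id_cons]
    have h1 : List.min? (x :: t) = some (t.foldl min x) := List.min?_cons'
    have h2 : List.min? (x' :: t') = some (t'.foldl min x') := List.min?_cons'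
    rw [List.min?_eq_some_iff] at h1 h2
    simp only [Option.getD_some, pvMin1]
    exact le_antisymm (h1.2 _ (h.mem_iff.mpr h2.1)) (h2.2 _ (h.mem_iff.mp h1.1))

theorem pvMax1_perm (l l' : List Int) (h : l.Perm l') (hne : l' ≠ []) :
    (PySem.List.max? l (fun v => v)).getD 0 = pvMax1 l' := by
  match l, l' with
  | [], _ => exact absurd h.symm.eq_nil hne
  | x :: t, [] => exact absurd rfl hne
  | x :: t, x' :: t' =>
    rw [PySem.List.max?_id_cons]
    have h1 : List.max? (x :: t) = some (t.foldl max x) := List.max?_cons'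
    have h2 : List.max? (x' :: t') = some (t'.foldl max x') := List.max?_cons'
    rw [List.max?_eq_some_iff] at h1 h2
    simp only [Option.getD_some, pvMax1]
    exact le_antisymm (h2.2 _ (h.mem_iff.mp h1.1)) (h1.2 _ (h.mem_iff.mpr h2.1))

-- A's per-line aggregation computes exactly the running bounds of the (unsorted) line
theorem pvAggA_eq (line : List (Int × Int × Int × Int)) (hne : line ≠ []) :
    pvAggA line =
      (pvMin1 (line.map fun b => b.1), pvMin1 (line.map fun b => b.2.1),
       pvMax1 (line.map fun b => b.1 + b.2.2.1) - pvMin1 (line.map fun b => b.1),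
       pvMax1 (line.map fun b => b.2.1 + b.2.2.2) - pvMin1 (line.map fun b => b.2.1)) := by
  have hp : (PySem.List.sorted line (fun b => b.1) false).Perm line := PySem.List.sorted_perm ..
  have hm : ∀ f : (Int × Int × Int × Int) → Int,
      ((PySem.List.sorted line (fun b => b.1) false).map f).Perm (line.map f) :=
    fun f => hp.map f
  have hne' : ∀ f : (Int × Int × Int × Int) → Int, line.map f ≠ [] := by
    intro f h; exact hne (List.map_eq_nil_iff.mp h)
  simp only [pvAggA, pvMin1_perm _ _ (hm _) (hne' _), pvMax1_perm _ _ (hm _) (hne' _)]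

theorem pvMin1_concat (l : List Int) (a : Int) (h : l ≠ []) :
    pvMin1 (l ++ [a]) = min (pvMin1 l) a := by
  match l with
  | x :: t => simp [pvMin1, List.foldl_append]

theorem pvMax1_concat (l : List Int) (a : Int) (h : l ≠ []) :
    pvMax1 (l ++ [a]) = max (pvMax1 l) a := by
  match l with
  | x :: t => simp [pvMax1, List.foldl_append]

-- main invariant: A's loop followed by aggregation equals B's fused loop
theorem pvLoop_eq (rest : List (Int × Int × Int × Int)) :
    ∀ (lines : List (List (Int × Int × Int × Int))) (cur : List (Int × Int × Int × Int))
      (t : Int), cur ≠ [] →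
    (pvLoopA rest lines cur t).map pvAggA =
      lines.map pvAggA ++
        pvGoB rest (cur.getLastD (0, 0, 0, 0))
          (pvMin1 (cur.map fun b => b.1)) (pvMin1 (cur.map fun b => b.2.1))
          (pvMax1 (cur.map fun b => b.1 + b.2.2.1)) (pvMax1 (cur.map fun b => b.2.1 + b.2.2.2)) t := by
  induction rest with
  | nil =>
    intro lines cur t hne
    simp [pvLoopA, pvGoB, pvAggA_eq cur hne]
  | cons b rs ih =>
    intro lines cur t hne
    simp only [pvLoopA, pvGoB]
    split_ifs with hc
    · rw [ih lines (cur ++ [b]) t (by simp)]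
      have hmap : ∀ f : (Int × Int × Int × Int) → Int,
          (cur ++ [b]).map f = cur.map f ++ [f b] := by simp
      have hne' : ∀ f : (Int × Int × Int × Int) → Int, cur.map f ≠ [] := by
        intro f h; exact hne (List.map_eq_nil_iff.mp h)
      rw [List.getLastD_concat]
      simp only [hmap, pvMin1_concat _ _ (hne' _), pvMax1_concat _ _ (hne' _)]
    · rw [ih (lines ++ [cur]) [b] t (by simp)]
      simp [pvAggA_eq cur hne, pvMin1, pvMax1]

-- ===== VERDICT (by name: the statement is the Claim_ definition above) =====
theorem merge_boxes_into_lines_spec : Claim_equal_merge_boxes_into_lines := by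
  intro boxes t _
  unfold Spec_merge_boxes_into_lines merge_boxes_into_lines merge_boxes_into_lines_alt
  by_cases hb : boxes = []
  · simp [hb, PySem.List.sorted]
  · simp only [hb, if_false]
    rcases hs : PySem.List.sorted boxes (fun b => b.2.1) false with _ | ⟨b0, rest⟩
    · rfl
    · dsimp only
      rw [pvLoop_eq rest [] [b0] t (by simp)]
      simp [pvMin1, pvMax1]
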